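-- pv_equiv track=rewrite | github.com/SouravDaedo/33_eplus_controls | manage_models.py | get_transition_path
-- ===== SOURCE A (Python) =====
-- TRANSITIONS = [
--     ("22.1", "22.2"),
--     ("22.2", "23.1"),
--     ("23.1", "23.2"),
--     ("23.2", "24.1"),
--     ("24.1", "24.2"),
--     ("24.2", "25.1"),
--     ("25.1", "25.2"),
-- ]
--
-- def get_transition_path(from_version, to_version):
--     """Get the path needed to transition from one version to another."""
--     from_major = '.'.join(from_version.split('.')[:2])
--     to_major = '.'.join(to_version.split('.')[:2])
--
--     if from_major == to_major:
--         return []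
--
--     path = []
--     current = from_major
--
--     for src, dst in TRANSITIONS:
--         if current == src:
--             path.append((src, dst))
--             current = dst
--             if current == to_major:
--                 break
--
--     if current != to_major:
--         return None
--
--     return path
-- ===== SOURCE B (Python) =====
-- TRANSITIONS = [
--     ("22.1", "22.2"),
--     ("22.2", "23.1"),
--     ("23.1", "23.2"),
--     ("23.2", "24.1"),
--     ("24.1", "24.2"),
--     ("24.2", "25.1"),
--     ("25.1", "25.2"),
-- ]
--
--
-- def get_transition_path(from_version, to_version):
--     """Get the path needed to transition from one version to another."""
--     from_major = '.'.join(from_version.split('.')[:2])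
--     to_major = '.'.join(to_version.split('.')[:2])
--
--     if from_major == to_major:
--         return []
--
--     graph = dict(TRANSITIONS)
--     path = []
--     current = from_major
--     while current != to_major:
--         nxt = graph.pop(current, None)  # pop: each version is followed at most once
--         if nxt is None:
--             return None
--         path.append((current, nxt))
--         current = nxt
--     return path
-- ===== Notes on version B (the rewrite author's own statement) =====
-- stated objective: idiomatic
-- what changed: Replaces A's ordered scan over the whole TRANSITIONS list (with break and leftover-state check) by an adjacency dict built once and a while-loop that chases successor pointers from the source version, returning None on a dead end.
import Mathlib
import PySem

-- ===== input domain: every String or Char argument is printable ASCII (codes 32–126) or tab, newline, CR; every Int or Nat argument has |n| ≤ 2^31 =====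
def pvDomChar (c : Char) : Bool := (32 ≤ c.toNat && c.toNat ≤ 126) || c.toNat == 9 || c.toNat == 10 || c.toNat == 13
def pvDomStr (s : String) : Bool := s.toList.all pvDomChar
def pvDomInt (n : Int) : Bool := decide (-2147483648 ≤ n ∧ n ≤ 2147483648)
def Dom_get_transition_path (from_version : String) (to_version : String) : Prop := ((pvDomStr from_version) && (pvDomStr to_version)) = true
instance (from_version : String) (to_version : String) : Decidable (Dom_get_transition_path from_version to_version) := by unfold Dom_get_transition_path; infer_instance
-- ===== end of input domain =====

-- B replaces A's full ordered scan of TRANSITIONS by pointer-chasing in an adjacency dict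
-- built once from it (objective: idiomatic); same return value everywhere.

-- ===== PORT A =====
def TRANSITIONS : List (String × String) :=
  [("22.1", "22.2"), ("22.2", "23.1"), ("23.1", "23.2"), ("23.2", "24.1"),
   ("24.1", "24.2"), ("24.2", "25.1"), ("25.1", "25.2")]

-- A's for-loop over TRANSITIONS with its break, as structural recursion on the list
def loopA : List (String × String) → List (String × String) → String → String →
    List (String × String) × String
  | [], path, current, _ => (path, current)
  | (src, dst) :: rest, path, current, to_major =>
    if current = src then
      let path' := path ++ [(src, dst)]
      if dst = to_major then (path', dst)
      else loopA rest path' dst to_major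
    else loopA rest path current to_major

def get_transition_path (from_version : String) (to_version : String) :
    Option (List (String × String)) :=
  let from_major := PySem.Str.join "." (((PySem.Str.split? from_version ".").getD []).take 2)
  let to_major := PySem.Str.join "." (((PySem.Str.split? to_version ".").getD []).take 2)
  if from_major = to_major then some []
  else
    let r := loopA TRANSITIONS [] from_major to_major
    if r.2 ≠ to_major then none
    else some r.1

-- ===== PORT B =====
-- termination helper for B's while-loop: graph.pop removes the key, so the dict shrinks
theorem pvPopSizeLt {d : PySem.Dict String String} {k : String} {v : String}
    {d' : PySem.Dict String String} (h : d.pop? k = some (v, d')) :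
    d'.size < d.size := by
  simp only [PySem.Dict.pop?, Option.map_eq_some_iff] at h
  obtain ⟨w, hw, heq⟩ := h
  obtain ⟨rfl, rfl⟩ : w = v ∧ d.erase k = d' := Prod.mk.injEq .. ▸ heq
  simp only [PySem.Dict.get?, Option.map_eq_some_iff] at hw
  obtain ⟨p, hp, _⟩ := hw
  have hmem := List.mem_of_find?_eq_some hp
  have hpk := List.find?_some hp
  simp only [PySem.Dict.erase, PySem.Dict.size]
  exact List.length_filter_lt_length_iff_exists.mpr ⟨p, hmem, by simp [hpk]⟩

-- B's while-loop: chase pointers in the graph, popping each visited key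
def chaseB (graph : PySem.Dict String String) (path : List (String × String))
    (current to_major : String) : Option (List (String × String)) :=
  if current = to_major then some path
  else
    match h : graph.pop? current with
    | none => none
    | some (nxt, graph') => chaseB graph' (path ++ [(current, nxt)]) nxt to_major
termination_by graph.size
decreasing_by exact pvPopSizeLt h

def get_transition_path_alt (from_version : String) (to_version : String) :
    Option (List (String × String)) :=
  let from_major := PySem.Str.join "." (((PySem.Str.split? from_version ".").getD []).take 2)
  let to_major := PySem.Str.join "." (((PySem.Str.split? to_version ".").getD []).take 2)
  if from_major = to_major then some []
  else chaseB (PySem.Dict.ofList TRANSITIONS) [] from_major to_major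

-- ===== PRECONDITION & SPEC =====
def Spec_get_transition_path (from_version : String) (to_version : String) (out : Option (List (String × String))) : Prop := out = get_transition_path_alt from_version to_version
instance (from_version : String) (to_version : String) (out : Option (List (String × String))) : Decidable (Spec_get_transition_path from_version to_version out) := by unfold Spec_get_transition_path; infer_instance

-- ===== CLAIM (what is proved, stated in full; the proofs are below) =====
def Claim_equal_get_transition_path : Prop := ∀ (from_version : String) (to_version : String), Dom_get_transition_path from_version to_version → Spec_get_transition_path from_version to_version (get_transition_path from_version to_version)

-- ===== LEMMAS AND PROOFS =====
-- the ofList build of B's adjacency dict, evaluated once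
theorem hg : PySem.Dict.ofList TRANSITIONS = PySem.Dict.mk TRANSITIONS := by decide

-- core: after the early-equal return, A's ordered scan equals B's pointer chase,
-- by exhausting the finitely many positions the majors can take in the fixed chain
theorem core_eq (F T : String) (hFT : ¬ F = T) :
    (if (loopA TRANSITIONS [] F T).2 ≠ T then none else some (loopA TRANSITIONS [] F T).1)
      = chaseB (PySem.Dict.ofList TRANSITIONS) [] F T := by
  rw [hg]
  by_cases f0 : F = "22.1"
  · subst f0
    by_cases t0 : ("22.2" = T)
    · subst t0; repeat (rw [chaseB]; simp_all [TRANSITIONS, PySem.Dict.pop?, PySem.Dict.get?, PySem.Dict.erase, List.find?, List.filter, loopA])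
    ·
      by_cases t1 : ("23.1" = T)
      · subst t1; repeat (rw [chaseB]; simp_all [TRANSITIONS, PySem.Dict.pop?, PySem.Dict.get?, PySem.Dict.erase, List.find?, List.filter, loopA])
      ·
        by_cases t2 : ("23.2" = T)
        · subst t2; repeat (rw [chaseB]; simp_all [TRANSITIONS, PySem.Dict.pop?, PySem.Dict.get?, PySem.Dict.erase, List.find?, List.filter, loopA])
        ·
          by_cases t3 : ("24.1" = T)
          · subst t3; repeat (rw [chaseB]; simp_all [TRANSITIONS, PySem.Dict.pop?, PySem.Dict.get?, PySem.Dict.erase, List.find?, List.filter, loopA])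
          ·
            by_cases t4 : ("24.2" = T)
            · subst t4; repeat (rw [chaseB]; simp_all [TRANSITIONS, PySem.Dict.pop?, PySem.Dict.get?, PySem.Dict.erase, List.find?, List.filter, loopA])
            ·
              by_cases t5 : ("25.1" = T)
              · subst t5; repeat (rw [chaseB]; simp_all [TRANSITIONS, PySem.Dict.pop?, PySem.Dict.get?, PySem.Dict.erase, List.find?, List.filter, loopA])
              ·
                by_cases t6 : ("25.2" = T)
                · subst t6; repeat (rw [chaseB]; simp_all [TRANSITIONS, PySem.Dict.pop?, PySem.Dict.get?, PySem.Dict.erase, List.find?, List.filter, loopA])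
                · repeat (rw [chaseB]; simp_all [TRANSITIONS, PySem.Dict.pop?, PySem.Dict.get?, PySem.Dict.erase, List.find?, List.filter, loopA])
  ·
    by_cases f1 : F = "22.2"
    · subst f1
      by_cases t0 : ("23.1" = T)
      · subst t0; repeat (rw [chaseB]; simp_all [TRANSITIONS, PySem.Dict.pop?, PySem.Dict.get?, PySem.Dict.erase, List.find?, List.filter, loopA])
      ·
        by_cases t1 : ("23.2" = T)
        · subst t1; repeat (rw [chaseB]; simp_all [TRANSITIONS, PySem.Dict.pop?, PySem.Dict.get?, PySem.Dict.erase, List.find?, List.filter, loopA])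
        ·
          by_cases t2 : ("24.1" = T)
          · subst t2; repeat (rw [chaseB]; simp_all [TRANSITIONS, PySem.Dict.pop?, PySem.Dict.get?, PySem.Dict.erase, List.find?, List.filter, loopA])
          ·
            by_cases t3 : ("24.2" = T)
            · subst t3; repeat (rw [chaseB]; simp_all [TRANSITIONS, PySem.Dict.pop?, PySem.Dict.get?, PySem.Dict.erase, List.find?, List.filter, loopA])
            ·
              by_cases t4 : ("25.1" = T)
              · subst t4; repeat (rw [chaseB]; simp_all [TRANSITIONS, PySem.Dict.pop?, PySem.Dict.get?, PySem.Dict.erase, List.find?, List.filter, loopA])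
              ·
                by_cases t5 : ("25.2" = T)
                · subst t5; repeat (rw [chaseB]; simp_all [TRANSITIONS, PySem.Dict.pop?, PySem.Dict.get?, PySem.Dict.erase, List.find?, List.filter, loopA])
                · repeat (rw [chaseB]; simp_all [TRANSITIONS, PySem.Dict.pop?, PySem.Dict.get?, PySem.Dict.erase, List.find?, List.filter, loopA])
    ·
      by_cases f2 : F = "23.1"
      · subst f2
        by_cases t0 : ("23.2" = T)
        · subst t0; repeat (rw [chaseB]; simp_all [TRANSITIONS, PySem.Dict.pop?, PySem.Dict.get?, PySem.Dict.erase, List.find?, List.filter, loopA])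
        ·
          by_cases t1 : ("24.1" = T)
          · subst t1; repeat (rw [chaseB]; simp_all [TRANSITIONS, PySem.Dict.pop?, PySem.Dict.get?, PySem.Dict.erase, List.find?, List.filter, loopA])
          ·
            by_cases t2 : ("24.2" = T)
            · subst t2; repeat (rw [chaseB]; simp_all [TRANSITIONS, PySem.Dict.pop?, PySem.Dict.get?, PySem.Dict.erase, List.find?, List.filter, loopA])
            ·
              by_cases t3 : ("25.1" = T)
              · subst t3; repeat (rw [chaseB]; simp_all [TRANSITIONS, PySem.Dict.pop?, PySem.Dict.get?, PySem.Dict.erase, List.find?, List.filter, loopA])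
              ·
                by_cases t4 : ("25.2" = T)
                · subst t4; repeat (rw [chaseB]; simp_all [TRANSITIONS, PySem.Dict.pop?, PySem.Dict.get?, PySem.Dict.erase, List.find?, List.filter, loopA])
                · repeat (rw [chaseB]; simp_all [TRANSITIONS, PySem.Dict.pop?, PySem.Dict.get?, PySem.Dict.erase, List.find?, List.filter, loopA])
      ·
        by_cases f3 : F = "23.2"
        · subst f3
          by_cases t0 : ("24.1" = T)
          · subst t0; repeat (rw [chaseB]; simp_all [TRANSITIONS, PySem.Dict.pop?, PySem.Dict.get?, PySem.Dict.erase, List.find?, List.filter, loopA])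
          ·
            by_cases t1 : ("24.2" = T)
            · subst t1; repeat (rw [chaseB]; simp_all [TRANSITIONS, PySem.Dict.pop?, PySem.Dict.get?, PySem.Dict.erase, List.find?, List.filter, loopA])
            ·
              by_cases t2 : ("25.1" = T)
              · subst t2; repeat (rw [chaseB]; simp_all [TRANSITIONS, PySem.Dict.pop?, PySem.Dict.get?, PySem.Dict.erase, List.find?, List.filter, loopA])
              ·
                by_cases t3 : ("25.2" = T)
                · subst t3; repeat (rw [chaseB]; simp_all [TRANSITIONS, PySem.Dict.pop?, PySem.Dict.get?, PySem.Dict.erase, List.find?, List.filter, loopA])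
                · repeat (rw [chaseB]; simp_all [TRANSITIONS, PySem.Dict.pop?, PySem.Dict.get?, PySem.Dict.erase, List.find?, List.filter, loopA])
        ·
          by_cases f4 : F = "24.1"
          · subst f4
            by_cases t0 : ("24.2" = T)
            · subst t0; repeat (rw [chaseB]; simp_all [TRANSITIONS, PySem.Dict.pop?, PySem.Dict.get?, PySem.Dict.erase, List.find?, List.filter, loopA])
            ·
              by_cases t1 : ("25.1" = T)
              · subst t1; repeat (rw [chaseB]; simp_all [TRANSITIONS, PySem.Dict.pop?, PySem.Dict.get?, PySem.Dict.erase, List.find?, List.filter, loopA])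
              ·
                by_cases t2 : ("25.2" = T)
                · subst t2; repeat (rw [chaseB]; simp_all [TRANSITIONS, PySem.Dict.pop?, PySem.Dict.get?, PySem.Dict.erase, List.find?, List.filter, loopA])
                · repeat (rw [chaseB]; simp_all [TRANSITIONS, PySem.Dict.pop?, PySem.Dict.get?, PySem.Dict.erase, List.find?, List.filter, loopA])
          ·
            by_cases f5 : F = "24.2"
            · subst f5
              by_cases t0 : ("25.1" = T)
              · subst t0; repeat (rw [chaseB]; simp_all [TRANSITIONS, PySem.Dict.pop?, PySem.Dict.get?, PySem.Dict.erase, List.find?, List.filter, loopA])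
              ·
                by_cases t1 : ("25.2" = T)
                · subst t1; repeat (rw [chaseB]; simp_all [TRANSITIONS, PySem.Dict.pop?, PySem.Dict.get?, PySem.Dict.erase, List.find?, List.filter, loopA])
                · repeat (rw [chaseB]; simp_all [TRANSITIONS, PySem.Dict.pop?, PySem.Dict.get?, PySem.Dict.erase, List.find?, List.filter, loopA])
            ·
              by_cases f6 : F = "25.1"
              · subst f6
                by_cases t0 : ("25.2" = T)
                · subst t0; repeat (rw [chaseB]; simp_all [TRANSITIONS, PySem.Dict.pop?, PySem.Dict.get?, PySem.Dict.erase, List.find?, List.filter, loopA])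
                · repeat (rw [chaseB]; simp_all [TRANSITIONS, PySem.Dict.pop?, PySem.Dict.get?, PySem.Dict.erase, List.find?, List.filter, loopA])
              ·
                have g0 : ("22.1" == F) = false := beq_eq_false_iff_ne.mpr (fun h => f0 h.symm)
                have g1 : ("22.2" == F) = false := beq_eq_false_iff_ne.mpr (fun h => f1 h.symm)
                have g2 : ("23.1" == F) = false := beq_eq_false_iff_ne.mpr (fun h => f2 h.symm)
                have g3 : ("23.2" == F) = false := beq_eq_false_iff_ne.mpr (fun h => f3 h.symm)
                have g4 : ("24.1" == F) = false := beq_eq_false_iff_ne.mpr (fun h => f4 h.symm)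
                have g5 : ("24.2" == F) = false := beq_eq_false_iff_ne.mpr (fun h => f5 h.symm)
                have g6 : ("25.1" == F) = false := beq_eq_false_iff_ne.mpr (fun h => f6 h.symm)
                have hpop : (PySem.Dict.mk TRANSITIONS).pop? F = none := by
                  simp [TRANSITIONS, PySem.Dict.pop?, PySem.Dict.get?, List.find?, g0, g1, g2, g3, g4, g5, g6]
                have hA : (if (loopA TRANSITIONS [] F T).2 ≠ T then (none : Option (List (String × String))) else some (loopA TRANSITIONS [] F T).1) = none := by
                  simp [loopA, TRANSITIONS, f0, f1, f2, f3, f4, f5, f6, hFT]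
                rw [hA, chaseB, if_neg hFT]
                split
                · rfl
                · rename_i heq; rw [hpop] at heq; cases heq


-- ===== VERDICT (by name: the statement is the Claim_ definition above) =====
theorem get_transition_path_spec : Claim_equal_get_transition_path := by
  intro f t _
  unfold Spec_get_transition_path get_transition_path get_transition_path_alt
  set F := PySem.Str.join "." (((PySem.Str.split? f ".").getD []).take 2) with hF
  set T := PySem.Str.join "." (((PySem.Str.split? t ".").getD []).take 2) with hT
  by_cases h : F = T
  · simp [h]
  · simp only [if_neg h]
    exact core_eq F T h
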